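-- pv_equiv track=rewrite | github.com/pypi-data/pypi-mirror-247 | packages/IutyLib/IutyLib-1.23.1218.1251.tar.gz/IutyLib-1.23.1218.1251/IutyLib/stock/qualification.py | VHV
-- ===== SOURCE A (Python) =====
-- def VHV(serial,index,item,length = 7):
--     default = (index,serial[index][item])
--     source = []
--     for i in range(index,0,-1):
--         source.append(serial[i][item])
--         if len(source) < length:
--             continue
--         i_rtn = length//2
--         if source[i_rtn] == max(source):
--             return (i+i_rtn,serial[i+i_rtn][item])
--         source.pop(0)
--     return default
-- ===== SOURCE B (Python) =====
-- def VHV(serial, index, item, length=7):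
--     # Descending scan over window start i, keeping the current window maximum
--     # incrementally (recomputed only when the evicted element was the maximum),
--     # instead of rebuilding a buffer list and calling max() at every step.
--     default = (index, serial[index][item])
--     i = index - length + 1          # start of the first (rightmost) full window
--     if i < 1:
--         return default
--     half = length // 2
--     cur = max(serial[j][item] for j in range(i, index + 1))   # max of window [i, i+length-1]
--     while True:
--         if serial[i + (length - 1) // 2][item] == cur:
--             return (i + half, serial[i + half][item])
--         if i == 1:
--             return default
--         evicted = serial[i + length - 1][item]
--         new = serial[i - 1][item]
--         if evicted < cur:
--             if new > cur:
--                 cur = new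
--         elif new >= cur:
--             cur = new
--         else:
--             cur = max(serial[j][item] for j in range(i - 1, i + length - 1))
--         i -= 1
-- ===== Notes on version B (the rewrite author's own statement) =====
-- stated objective: faster
-- what changed: A rebuilds a sliding buffer (append + pop(0)) and rescans it with max() at every step; B walks the window starts once, maintaining the current window maximum incrementally and recomputing it only when the evicted element was the maximum, so the per-step max() scan and the O(length) pop(0) disappear (speed not measurable by the harness here).
-- outside the precondition, e.g. on VHV([[1], [2]], 1, 0, 0): A returns (1, 2), B raises ValueError; on VHV([[1], [2]], 1, 0, -1): A returns (0, 1), B raises ValueError; on VHV([[], [1], [2]], 2, 0, 7): A returns (2, 2), B returns (2, 2)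
import Mathlib
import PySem

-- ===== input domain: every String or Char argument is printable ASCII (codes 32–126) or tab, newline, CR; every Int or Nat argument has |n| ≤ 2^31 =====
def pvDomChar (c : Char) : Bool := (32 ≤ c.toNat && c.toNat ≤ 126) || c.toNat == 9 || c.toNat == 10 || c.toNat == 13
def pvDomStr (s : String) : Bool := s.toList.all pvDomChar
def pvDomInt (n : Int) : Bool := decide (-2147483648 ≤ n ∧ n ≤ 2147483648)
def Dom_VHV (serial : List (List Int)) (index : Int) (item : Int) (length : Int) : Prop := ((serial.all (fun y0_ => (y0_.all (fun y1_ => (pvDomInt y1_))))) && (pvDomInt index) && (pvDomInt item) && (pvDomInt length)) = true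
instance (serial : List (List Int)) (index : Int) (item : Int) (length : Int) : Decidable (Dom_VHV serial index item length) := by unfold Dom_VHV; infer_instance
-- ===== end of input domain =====

-- B replaces A's per-step buffer rebuild (append/pop(0)) + full max() scan by a descending scan
-- that maintains the current window maximum incrementally, recomputing it only when the evicted
-- element was the maximum (objective: faster; a timing run could not measure it here).

-- ===== PORT A =====
-- shared subscript helper: serial[i][item] (total form; Pre_ keeps the indices in range)
def pyAt (serial : List (List Int)) (i item : Int) : Int :=
  PySem.List.pyGetD (PySem.List.pyGetD serial i []) item 0

def VHVloop (serial : List (List Int)) (item length : Int) (default : Int × Int) :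
    List Int → List Int → Int × Int
  | [], _source => default
  | i :: rest, source0 =>
      let source := source0 ++ [pyAt serial i item]
      if (source.length : Int) < length then
        VHVloop serial item length default rest source
      else
        let i_rtn := PySem.Int.floordiv length 2
        if PySem.List.pyGetD source i_rtn 0 = (PySem.List.max? source (fun x => x)).getD 0 then
          (i + i_rtn, pyAt serial (i + i_rtn) item)
        else
          VHVloop serial item length default rest
            (((PySem.List.pop? source 0).map (fun r => r.2)).getD [])

def VHV (serial : List (List Int)) (index : Int) (item : Int) (length : Int) : Int × Int :=
  let default := (index, pyAt serial index item)
  VHVloop serial item length default (PySem.List.pyRange index 0 (-1)) []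

-- ===== PORT B =====
-- max(serial[j][item] for j in range(a, b))
def VHVwmax (serial : List (List Int)) (item a b : Int) : Int :=
  (PySem.List.max? ((PySem.List.pyRange a b 1).map (fun j => pyAt serial j item)) (fun x => x)).getD 0

def VHValtLoop (serial : List (List Int)) (item length half : Int) (default : Int × Int) :
    Nat → Int → Int → Int × Int
  | 0, _i, _cur => default
  | fuel+1, i, cur =>
      if pyAt serial (i + PySem.Int.floordiv (length - 1) 2) item = cur then
        (i + half, pyAt serial (i + half) item)
      else if i = 1 then default
      else
        let evicted := pyAt serial (i + length - 1) item
        let nw := pyAt serial (i - 1) item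
        let cur' :=
          if evicted < cur then (if cur < nw then nw else cur)
          else if cur ≤ nw then nw
          else VHVwmax serial item (i - 1) (i + length - 1)
        VHValtLoop serial item length half default fuel (i - 1) cur'

def VHV_alt (serial : List (List Int)) (index : Int) (item : Int) (length : Int) : Int × Int :=
  let default := (index, pyAt serial index item)
  let i := index - length + 1
  if i < 1 then default
  else
    let half := PySem.Int.floordiv length 2
    let cur := VHVwmax serial item i (index + 1)
    VHValtLoop serial item length half default i.toNat i cur

-- ===== PRECONDITION & SPEC =====
-- Pre_ excludes: length ≤ 0 (A indexes source[length//2] through negative-index wraparound,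
-- raising IndexError for length ≤ -3, while B's window scan needs a positive window size and
-- raises ValueError on an empty max()), and out-of-range subscripts (IndexError); requiring
-- every row to admit item is a slight uniform narrowing (a run that returns early never reads
-- the rows below its window).  Negative index/item stay inside Pre_: both programs subscript
-- identically, with Python's negative-index wraparound.
def Pre_VHV (serial : List (List Int)) (index : Int) (item : Int) (length : Int) : Prop :=
  1 ≤ length ∧ PySem.Raise.InRange serial.length index ∧
    ∀ row ∈ serial, PySem.Raise.InRange row.length item
instance (serial : List (List Int)) (index : Int) (item : Int) (length : Int) :
    Decidable (Pre_VHV serial index item length) := by unfold Pre_VHV; infer_instance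

def pvWitness_VHV : List (List Int) × Int × Int × Int :=
  ([[1, 2], [3, 4], [0, 5], [2, 2], [9, 9], [1, 1], [4, 4], [5, 0]], 4, 1, 3)

def Spec_VHV (serial : List (List Int)) (index : Int) (item : Int) (length : Int) (out : Int × Int) : Prop := out = VHV_alt serial index item length
instance (serial : List (List Int)) (index : Int) (item : Int) (length : Int) (out : Int × Int) : Decidable (Spec_VHV serial index item length out) := by unfold Spec_VHV; infer_instance

-- ===== CLAIM (what is proved, stated in full; the proofs are below) =====
def Claim_equal_VHV : Prop := ∀ (serial : List (List Int)) (index : Int) (item : Int) (length : Int), Dom_VHV serial index item length → Pre_VHV serial index item length → Spec_VHV serial index item length (VHV serial index item length)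

-- ===== LEMMAS AND PROOFS =====

-- reference recursion: B's loop with the window maximum written out
def Gref (serial : List (List Int)) (item length half : Int) (default : Int × Int) :
    Nat → Int → Int × Int
  | 0, _i => default
  | fuel+1, i =>
      if pyAt serial (i + PySem.Int.floordiv (length - 1) 2) item = VHVwmax serial item i (i + length) then
        (i + half, pyAt serial (i + half) item)
      else if i = 1 then default
      else Gref serial item length half default fuel (i - 1)

lemma wm_spec (serial : List (List Int)) (item a b : Int) (h : a < b) :
    (∃ j, a ≤ j ∧ j < b ∧ VHVwmax serial item a b = pyAt serial j item) ∧
      (∀ j, a ≤ j → j < b → pyAt serial j item ≤ VHVwmax serial item a b) := by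
  have hne : ((PySem.List.pyRange a b 1).map (fun j => pyAt serial j item)) ≠ [] := by
    intro hnil
    have := congrArg List.length hnil
    simp [PySem.List.length_pyRange_one] at this
    omega
  obtain ⟨m, hm⟩ : ∃ m, PySem.List.max? ((PySem.List.pyRange a b 1).map (fun j => pyAt serial j item)) (fun x => x) = some m := by
    cases hmx : PySem.List.max? ((PySem.List.pyRange a b 1).map (fun j => pyAt serial j item)) (fun x => x) with
    | none => exact absurd ((PySem.List.max?_eq_none_iff _ _).mp hmx) hne
    | some m => exact ⟨m, rfl⟩
  have hwm : VHVwmax serial item a b = m := by simp [VHVwmax, hm]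
  constructor
  · have hmem := PySem.List.max?_mem hm
    rcases List.mem_map.mp hmem with ⟨j, hj, hjv⟩
    rcases (PySem.List.mem_pyRange_one).mp hj with ⟨hj1, hj2⟩
    exact ⟨j, hj1, hj2, by rw [hwm, hjv]⟩
  · intro j hj1 hj2
    have hjmem : pyAt serial j item ∈ (PySem.List.pyRange a b 1).map (fun j => pyAt serial j item) :=
      List.mem_map.mpr ⟨j, (PySem.List.mem_pyRange_one).mpr ⟨hj1, hj2⟩, rfl⟩
    have := PySem.List.max?_isMax hm _ hjmem
    simpa [hwm] using this

lemma wm_eq_of (serial : List (List Int)) (item a b x : Int) (h : a < b)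
    (hmem : ∃ j, a ≤ j ∧ j < b ∧ pyAt serial j item = x)
    (hub : ∀ j, a ≤ j → j < b → pyAt serial j item ≤ x) :
    VHVwmax serial item a b = x := by
  obtain ⟨⟨j0, hj0a, hj0b, hj0⟩, hdom⟩ := wm_spec serial item a b h
  obtain ⟨j, hja, hjb, hj⟩ := hmem
  exact le_antisymm (hj0 ▸ hub j0 hj0a hj0b) (hj ▸ hdom j hja hjb)

lemma loopB_eq_G (serial : List (List Int)) (item length half : Int) (default : Int × Int)
    (hL : 1 ≤ length) :
    ∀ (fuel : Nat) (i : Int), 1 ≤ i →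
      VHValtLoop serial item length half default fuel i (VHVwmax serial item i (i + length)) =
        Gref serial item length half default fuel i := by
  intro fuel
  induction fuel with
  | zero => intro i hi; rfl
  | succ fuel ih =>
    intro i hi
    simp only [VHValtLoop, Gref]
    by_cases hchk : pyAt serial (i + PySem.Int.floordiv (length - 1) 2) item = VHVwmax serial item i (i + length)
    · rw [if_pos hchk, if_pos hchk]
    · simp only [if_neg hchk]
      by_cases hi1 : i = 1
      · rw [if_pos hi1, if_pos hi1]
      · simp only [if_neg hi1]
        have hi2 : 2 ≤ i := by omega
        set M := VHVwmax serial item i (i + length) with hM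
        have hwin : i < i + length := by omega
        have hwin' : i - 1 < i + length - 1 := by omega
        obtain ⟨hMmem, hMub⟩ := wm_spec serial item i (i + length) hwin
        have hEle : pyAt serial (i + length - 1) item ≤ M := hMub _ (by omega) (by omega)
        have key : (if pyAt serial (i + length - 1) item < M then
              (if M < pyAt serial (i - 1) item then pyAt serial (i - 1) item else M)
            else if M ≤ pyAt serial (i - 1) item then pyAt serial (i - 1) item
            else VHVwmax serial item (i - 1) (i + length - 1)) =
            VHVwmax serial item (i - 1) (i + length - 1) := by
          by_cases hE : pyAt serial (i + length - 1) item < M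
          · simp only [if_pos hE]
            by_cases hN : M < pyAt serial (i - 1) item
            · simp only [if_pos hN]
              refine (wm_eq_of serial item _ _ _ hwin' ⟨i - 1, le_refl _, by omega, rfl⟩ ?_).symm
              intro j hj1 hj2
              rcases eq_or_lt_of_le hj1 with hj | hj
              · rw [← hj]
              · exact le_of_lt (lt_of_le_of_lt (hMub j (by omega) (by omega)) hN)
            · simp only [if_neg hN]
              push Not at hN
              obtain ⟨j0, hj0a, hj0b, hj0⟩ := hMmem
              have hj0ne : j0 ≠ i + length - 1 := by
                intro hEq; rw [hEq] at hj0; omega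
              refine (wm_eq_of serial item _ _ _ hwin' ⟨j0, by omega, by omega, hj0.symm⟩ ?_).symm
              intro j hj1 hj2
              rcases eq_or_lt_of_le hj1 with hj | hj
              · rw [← hj]; exact hN
              · exact hMub j (by omega) (by omega)
          · simp only [if_neg hE]
            push Not at hE
            have hEeq : pyAt serial (i + length - 1) item = M := le_antisymm hEle hE
            by_cases hN : M ≤ pyAt serial (i - 1) item
            · simp only [if_pos hN]
              refine (wm_eq_of serial item _ _ _ hwin' ⟨i - 1, le_refl _, by omega, rfl⟩ ?_).symm
              intro j hj1 hj2
              rcases eq_or_lt_of_le hj1 with hj | hj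
              · rw [← hj]
              · exact le_trans (hMub j (by omega) (by omega)) hN
            · simp only [if_neg hN]
        rw [key]
        have harg : i + length - 1 = i - 1 + length := by ring
        rw [harg]
        exact ih (i - 1) (by omega)

lemma loopA_short (serial : List (List Int)) (item length : Int) (default : Int × Int) :
    ∀ (k : Nat) (source : List Int), (source.length : Int) + k < length →
      VHVloop serial item length default (PySem.List.pyRange (k : Int) 0 (-1)) source = default := by
  intro k
  induction k with
  | zero =>
    intro source h
    rw [PySem.List.pyRange_neg_one_eq_nil (by omega)]
    rfl
  | succ k ih =>
    intro source h
    rw [PySem.List.pyRange_neg_one_cons (by omega : (0:Int) < (k+1 : Nat))]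
    simp only [VHVloop]
    rw [if_pos (by simp; push_cast at h ⊢; omega)]
    have : ((k+1:Nat):Int) - 1 = ((k:Nat):Int) := by push_cast; ring
    rw [this]
    apply ih
    simp; push_cast at h ⊢; omega

lemma fillA (serial : List (List Int)) (item length index : Int) (default : Int × Int)
    (hlo : 1 ≤ index - length + 1) :
    ∀ (k : Nat), (k : Int) ≤ length - 1 →
      VHVloop serial item length default (PySem.List.pyRange index 0 (-1)) [] =
        VHVloop serial item length default (PySem.List.pyRange (index - k) 0 (-1))
          (((PySem.List.pyRange (index - k + 1) (index + 1) 1).map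
              (fun j => pyAt serial j item)).reverse) := by
  intro k
  induction k with
  | zero =>
    intro _
    rw [show index - (0:Nat) = index by push_cast; ring,
        PySem.List.pyRange_one_eq_nil (le_refl (index + 1))]
    rfl
  | succ k ih =>
    intro hk
    have hk' : (k : Int) ≤ length - 1 := by push_cast at hk ⊢; omega
    rw [ih hk']
    have hi : (0:Int) < index - k := by push_cast at hk; omega
    rw [PySem.List.pyRange_neg_one_cons hi]
    simp only [VHVloop]
    have hcons : PySem.List.pyRange (index - k) (index + 1) 1 =
        (index - k) :: PySem.List.pyRange (index - k + 1) (index + 1) 1 :=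
      PySem.List.pyRange_one_cons (by push_cast at hk; omega)
    have hacc : ((PySem.List.pyRange (index - k + 1) (index + 1) 1).map
          (fun j => pyAt serial j item)).reverse ++ [pyAt serial (index - k) item] =
        ((PySem.List.pyRange (index - k) (index + 1) 1).map
          (fun j => pyAt serial j item)).reverse := by
      rw [hcons, List.map_cons, List.reverse_cons]
    rw [hacc]
    have hlen : ((((PySem.List.pyRange (index - k) (index + 1) 1).map
          (fun j => pyAt serial j item)).reverse).length : Int) = (k : Int) + 1 := by
      simp [PySem.List.length_pyRange_one]
      push_cast at hk ⊢
      omega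
    rw [if_pos (by rw [hlen]; push_cast at hk ⊢; omega)]
    rw [show index - k - 1 = index - (k+1 : Nat) by push_cast; ring,
        show index - k = index - (k+1 : Nat) + 1 by push_cast; ring]

lemma maxv_reverse (l : List Int) :
    (PySem.List.max? l.reverse (fun x => x)).getD 0 = (PySem.List.max? l (fun x => x)).getD 0 := by
  rcases eq_or_ne l [] with h | h
  · subst h; rfl
  · obtain ⟨m1, hm1⟩ : ∃ m1, PySem.List.max? l.reverse (fun x => x) = some m1 := by
      cases hx : PySem.List.max? l.reverse (fun x => x) with
      | none => exact absurd (by simpa using (PySem.List.max?_eq_none_iff _ _).mp hx) h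
      | some m => exact ⟨m, rfl⟩
    obtain ⟨m2, hm2⟩ : ∃ m2, PySem.List.max? l (fun x => x) = some m2 := by
      cases hx : PySem.List.max? l (fun x => x) with
      | none => exact absurd ((PySem.List.max?_eq_none_iff _ _).mp hx) h
      | some m => exact ⟨m, rfl⟩
    rw [hm1, hm2]
    simp only [Option.getD_some]
    have h1 := PySem.List.max?_mem hm1
    have h2 := PySem.List.max?_mem hm2
    exact le_antisymm (PySem.List.max?_isMax hm2 _ (List.mem_reverse.mp h1))
      (PySem.List.max?_isMax hm1 _ (List.mem_reverse.mpr h2))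

lemma steadyA (serial : List (List Int)) (item length : Int) (default : Int × Int)
    (hL : 1 ≤ length) :
    ∀ (n : Nat) (i : Int), i = (n : Int) → 1 ≤ i →
      VHVloop serial item length default (PySem.List.pyRange i 0 (-1))
          (((PySem.List.pyRange (i + 1) (i + length) 1).map (fun j => pyAt serial j item)).reverse) =
        Gref serial item length (PySem.Int.floordiv length 2) default n i := by
  intro n
  induction n with
  | zero => intro i hi hi1; omega
  | succ n ih =>
    intro i hi hi1
    have hs : ((PySem.List.pyRange (i + 1) (i + length) 1).map (fun j => pyAt serial j item)).reverse
          ++ [pyAt serial i item] =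
        ((PySem.List.pyRange i (i + length) 1).map (fun j => pyAt serial j item)).reverse := by
      rw [PySem.List.pyRange_one_cons (by omega : i < i + length), List.map_cons, List.reverse_cons]
    have hs2 : ((PySem.List.pyRange i ((i + length - 1) + 1) 1).map (fun j => pyAt serial j item)).reverse =
        pyAt serial (i + length - 1) item ::
          ((PySem.List.pyRange i (i + length - 1) 1).map (fun j => pyAt serial j item)).reverse := by
      rw [PySem.List.pyRange_one_succ_right (by omega : i ≤ i + length - 1),
          List.map_append, List.reverse_append]
      rfl
    rw [show (i + length - 1) + 1 = i + length by ring] at hs2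
    rw [PySem.List.pyRange_neg_one_cons (by omega : (0:Int) < i)]
    simp only [VHVloop, Gref]
    rw [hs]
    have hfd : PySem.Int.floordiv length 2 = length / 2 :=
      PySem.Int.floordiv_eq_ediv_of_pos (by omega)
    have hfd1 : PySem.Int.floordiv (length - 1) 2 = (length - 1) / 2 :=
      PySem.Int.floordiv_eq_ediv_of_pos (by omega)
    have hlen : ((((PySem.List.pyRange i (i + length) 1).map
          (fun j => pyAt serial j item)).reverse).length : Int) = length := by
      simp [PySem.List.length_pyRange_one]
      omega
    rw [if_neg (by rw [hlen]; omega)]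
    have hidx : PySem.List.pyGetD
        (((PySem.List.pyRange i (i + length) 1).map (fun j => pyAt serial j item)).reverse)
        (PySem.Int.floordiv length 2) 0 =
        pyAt serial (i + PySem.Int.floordiv (length - 1) 2) item := by
      rw [PySem.List.pyGetD_eq_getElem _ _ (by rw [hfd]; omega)
          (by rw [hlen, hfd]; omega)]
      rw [List.getElem_reverse]
      rw [List.getElem_map, PySem.List.getElem_pyRange_one]
      congr 1
      have h1 : (((PySem.List.pyRange i (i + length) 1).map
          (fun j => pyAt serial j item)).length) = length.toNat := by
        simp [PySem.List.length_pyRange_one]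
      rw [h1]
      rw [hfd1]
      omega
    have hmax : (PySem.List.max?
          (((PySem.List.pyRange i (i + length) 1).map (fun j => pyAt serial j item)).reverse)
          (fun x => x)).getD 0 = VHVwmax serial item i (i + length) := by
      rw [maxv_reverse]; rfl
    rw [hidx, hmax]
    by_cases hc : pyAt serial (i + PySem.Int.floordiv (length - 1) 2) item =
        VHVwmax serial item i (i + length)
    · rw [if_pos hc, if_pos hc]
    · rw [if_neg hc, if_neg hc]
      rw [hs2]
      rw [PySem.List.pop?_zero_cons]
      simp only [Option.map_some, Option.getD_some]
      by_cases hi1' : i = 1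
      · rw [if_pos hi1']
        subst hi1'
        rw [show (1:Int) - 1 = 0 by ring, PySem.List.pyRange_neg_one_eq_nil (le_refl 0)]
        rfl
      · rw [if_neg hi1']
        rw [show i + length - 1 = (i - 1) + length by ring,
            show (PySem.List.pyRange i ((i-1) + length) 1) = (PySem.List.pyRange ((i-1)+1) ((i-1) + length) 1) by rw [show (i-1)+1 = i by ring]]
        exact ih (i - 1) (by omega) (by omega)

lemma VHV_eq_of_pre : ∀ (serial : List (List Int)) (index item length : Int),
    Pre_VHV serial index item length → VHV serial index item length = VHV_alt serial index item length := by
  intro serial index item length hPre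
  obtain ⟨hL, -, -⟩ := hPre
  by_cases hlo : index - length + 1 < 1
  · have hB : VHV_alt serial index item length = (index, pyAt serial index item) := by
      simp only [VHV_alt]; rw [if_pos hlo]
    have hA : VHV serial index item length = (index, pyAt serial index item) := by
      by_cases h0 : index ≤ 0
      · simp only [VHV]
        rw [PySem.List.pyRange_neg_one_eq_nil h0]
        rfl
      · simp only [VHV]
        rw [show PySem.List.pyRange index 0 (-1) =
              PySem.List.pyRange ((index.toNat : Nat) : Int) 0 (-1) by
            congr 1; omega]
        exact loopA_short serial item length _ index.toNat [] (by simp; omega)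
    rw [hA, hB]
  · have hlo' : 1 ≤ index - length + 1 := by omega
    have hA : VHV serial index item length =
        Gref serial item length (PySem.Int.floordiv length 2) (index, pyAt serial index item)
          (index - length + 1).toNat (index - length + 1) := by
      simp only [VHV]
      have hfill := fillA serial item length index (index, pyAt serial index item) hlo'
        ((length - 1).toNat) (by omega)
      rw [show (index - ((length - 1).toNat : Int)) = index - length + 1 by omega] at hfill
      rw [hfill]
      have hsteady := steadyA serial item length (index, pyAt serial index item) hL
        (index - length + 1).toNat (index - length + 1) (by omega) hlo'
      rw [show (index - length + 1) + length = index + 1 by ring] at hsteady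
      exact hsteady
    have hB : VHV_alt serial index item length =
        Gref serial item length (PySem.Int.floordiv length 2) (index, pyAt serial index item)
          (index - length + 1).toNat (index - length + 1) := by
      simp only [VHV_alt]
      rw [if_neg hlo]
      have hlb := loopB_eq_G serial item length (PySem.Int.floordiv length 2)
        (index, pyAt serial index item) hL (index - length + 1).toNat (index - length + 1) hlo'
      rw [show (index - length + 1) + length = index + 1 by ring] at hlb
      exact hlb
    rw [hA, hB]

-- ===== VERDICT (by name: the statement is the Claim_ definition above) =====
theorem VHV_spec : Claim_equal_VHV := by
  intro serial index item length _hDom hPre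
  unfold Spec_VHV
  exact VHV_eq_of_pre serial index item length hPre
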